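-- pv_equiv track=rewrite | github.com/yakhyazadea/AOIS_4sem | aois_2_yakhyazade.py | func_sdnf
-- ===== SOURCE A (Python) =====
-- arguments = [[0, 0, 0, 0, 1, 1, 1, 1], [0, 0 , 1, 1, 0, 0, 1, 1], [0, 1, 0, 1, 0, 1, 0, 1]]
--
-- def func_sdnf(array):
--     res = ''
--     i = 0
--     while i < len(array):
--         if array[i] == 1:
--
--             if res != '':
--                 res = res + "v"
--             res = res + '('
--             if arguments[0][i] == 0:
--                 res = res + "!a"
--             else:
--                 res = res + "a"
--             res = res + "&"
--             if arguments[1][i] == 0: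
--                 res = res + "!b"
--             else:
--                 res = res + "b"
--             res = res + "&"
--             if arguments[2][i] == 0:
--                 res = res + "!c"
--             else:
--                 res = res + "c"
--             #if res != '' and res[len(res) - 1] != "(":
--                 #res = res + "&"
--
--             res = res + ')'
--
--
--         i = i + 1
--
--
--     return res
-- ===== SOURCE B (Python) =====
-- arguments = [[0, 0, 0, 0, 1, 1, 1, 1], [0, 0 , 1, 1, 0, 0, 1, 1], [0, 1, 0, 1, 0, 1, 0, 1]]
--
-- # `arguments` is exactly the standard 3-bit counting truth table, so the minterm
-- # for column i is fully determined by i: precompute all 8 minterm strings once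
-- # and just look them up.  MINTERMS[i] raises IndexError for i >= 8, like A.
-- MINTERMS = ['(!a&!b&!c)', '(!a&!b&c)', '(!a&b&!c)', '(!a&b&c)',
--             '(a&!b&!c)', '(a&!b&c)', '(a&b&!c)', '(a&b&c)']
--
-- def func_sdnf(array):
--     return 'v'.join(MINTERMS[i] for i, v in enumerate(array) if v == 1)
-- ===== Notes on version B (the rewrite author's own statement) =====
-- stated objective: simpler
-- what changed: A constructs each minterm character by character from three per-variable truth-table reads with manual separator bookkeeping; B never reads the truth table at all: since `arguments` is the 3-bit counting table, B precomputes the 8 possible minterm strings in a lookup table and returns 'v'.join of the entries selected by the 1-positions of the input.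
import Mathlib
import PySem

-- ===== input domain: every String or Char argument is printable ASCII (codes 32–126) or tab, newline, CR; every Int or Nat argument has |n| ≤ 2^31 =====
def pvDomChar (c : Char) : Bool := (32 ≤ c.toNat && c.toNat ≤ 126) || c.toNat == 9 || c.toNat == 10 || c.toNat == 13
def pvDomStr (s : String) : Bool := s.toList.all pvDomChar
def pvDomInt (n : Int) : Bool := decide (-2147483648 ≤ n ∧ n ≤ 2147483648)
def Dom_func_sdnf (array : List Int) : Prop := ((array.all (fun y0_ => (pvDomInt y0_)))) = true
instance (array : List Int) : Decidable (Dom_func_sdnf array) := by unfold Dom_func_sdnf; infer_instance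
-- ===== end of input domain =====

-- B replaces A's per-variable truth-table reads and character-by-character string surgery
-- by a precomputed 8-entry minterm lookup table (valid because `arguments` is the 3-bit
-- counting table) joined with 'v' over the 1-positions of the input (simpler).


-- module-level constant `arguments` used by A
def pyArguments : List (List Int) :=
  [[0, 0, 0, 0, 1, 1, 1, 1], [0, 0, 1, 1, 0, 0, 1, 1], [0, 1, 0, 1, 0, 1, 0, 1]]

-- ===== PORT A =====
-- loop body of A's while loop (i runs over 0 .. len-1; indexing is in range inside Pre_)
def stepA (array : List Int) (res : String) (i : Nat) : String :=
  if array.getD i 0 = 1 then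
    let res := if res ≠ "" then res ++ "v" else res
    let res := res ++ "("
    let res := if (pyArguments.getD 0 []).getD i 0 = 0 then res ++ "!a" else res ++ "a"
    let res := res ++ "&"
    let res := if (pyArguments.getD 1 []).getD i 0 = 0 then res ++ "!b" else res ++ "b"
    let res := res ++ "&"
    let res := if (pyArguments.getD 2 []).getD i 0 = 0 then res ++ "!c" else res ++ "c"
    res ++ ")"
  else res

def func_sdnf (array : List Int) : String :=
  (List.range array.length).foldl (stepA array) ""

-- ===== PORT B =====
-- B's precomputed minterm table
def minterms : List String :=
  ["(!a&!b&!c)", "(!a&!b&c)", "(!a&b&!c)", "(!a&b&c)",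
   "(a&!b&!c)", "(a&!b&c)", "(a&b&!c)", "(a&b&c)"]

-- 'v'.join(MINTERMS[i] for i, v in enumerate(array) if v == 1)
def func_sdnf_alt (array : List Int) : String :=
  PySem.Str.join "v" ((PySem.List.enumerate array).filterMap
    (fun p => if p.2 = 1 then some (PySem.List.pyGetD minterms p.1 "") else none))

-- ===== PRECONDITION & SPEC =====
-- Pre_ excludes exactly the inputs on which A raises IndexError: a value 1 at some index ≥ 8
-- (the rows of `arguments` have length 8); B raises there too.
def Pre_func_sdnf (array : List Int) : Prop := ∀ x ∈ array.drop 8, x ≠ 1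
instance (array : List Int) : Decidable (Pre_func_sdnf array) := by unfold Pre_func_sdnf; infer_instance
def pvWitness_func_sdnf : List Int := [1, 0, 1]

def Spec_func_sdnf (array : List Int) (out : String) : Prop := out = func_sdnf_alt array
instance (array : List Int) (out : String) : Decidable (Spec_func_sdnf array out) := by unfold Spec_func_sdnf; infer_instance

-- ===== CLAIM =====
def Claim_equal_func_sdnf : Prop := ∀ (array : List Int), Dom_func_sdnf array → Pre_func_sdnf array → Spec_func_sdnf array (func_sdnf array)

-- ===== LEMMAS AND PROOFS =====

-- B's selected-minterms list, re-expressed over Nat indices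
def listB (array : List Int) (n : Nat) : List String :=
  (List.range n).filterMap (fun k => if array.getD k 0 = 1 then some (minterms.getD k "") else none)

lemma alt_eq_listB (array : List Int) :
    func_sdnf_alt array = PySem.Str.join "v" (listB array array.length) := by
  unfold func_sdnf_alt listB
  rw [PySem.List.enumerate_eq_map_pyRange array 0, List.filterMap_map,
      PySem.List.pyRange_one, List.filterMap_map]
  simp [Function.comp, PySem.List.pyGetD_natCast]

lemma join_snoc (ts : List String) (t : String) :
    PySem.Str.join "v" (ts ++ [t])
      = if ts = [] then t else PySem.Str.join "v" ts ++ "v" ++ t := by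
  induction ts with
  | nil => simp [PySem.Str.join, PySem.Chars.join, List.intercalate]
  | cons a ts ih =>
    cases ts with
    | nil => simp [PySem.Str.join, PySem.Chars.join, String.ext_iff, String.toList_append,
        List.intercalate]
    | cons b ts =>
      simp_all [PySem.Str.join, PySem.Chars.join, String.ext_iff, String.toList_append,
        List.intercalate]

lemma append_ne_empty (s t : String) (ht : t ≠ "") : s ++ t ≠ "" := by
  intro h
  have := congrArg String.toList h
  simp [String.toList_append] at this
  exact ht (by cases this; simp_all)

-- A's step, for an in-table 1-column, appends exactly the table minterm
lemma stepA_eq_minterm (array : List Int) (res : String) (n : Nat)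
    (h1 : array.getD n 0 = 1) (hn8 : n < 8) :
    stepA array res n = (if res ≠ "" then res ++ "v" else res) ++ minterms.getD n "" := by
  unfold stepA
  rw [if_pos h1]
  interval_cases n <;>
    simp only [pyArguments, minterms, List.getD, List.getElem?_cons_zero,
      List.getElem?_cons_succ, Option.getD_some] <;>
    norm_num <;>
    split_ifs <;>
    simp [String.ext_iff, String.toList_append]

lemma stepA_last_ne (array : List Int) (res : String) (n : Nat)
    (h1 : array.getD n 0 = 1) (hn8 : n < 8) :
    stepA array res n ≠ "" := by
  rw [stepA_eq_minterm array res n h1 hn8]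
  apply append_ne_empty
  interval_cases n <;> simp [minterms]

lemma main_inv (array : List Int) (hpre : Pre_func_sdnf array) :
    ∀ n, n ≤ array.length →
      (List.range n).foldl (stepA array) "" = PySem.Str.join "v" (listB array n)
        ∧ (listB array n = [] ↔ (List.range n).foldl (stepA array) "" = "") := by
  intro n
  induction n with
  | zero => intro _; simp [listB, PySem.Str.join, PySem.Chars.join, List.intercalate]
  | succ n ih =>
    intro hn
    obtain ⟨ihEq, ihIff⟩ := ih (Nat.le_of_succ_le hn)
    have hsplit : listB array (n + 1)
        = listB array n ++ (if array.getD n 0 = 1 then [minterms.getD n ""] else []) := by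
      unfold listB
      rw [List.range_succ, List.filterMap_append, List.filterMap_cons, List.filterMap_nil]
      by_cases h : array.getD n 0 = 1 <;>
        rw [List.getD_eq_getElem?_getD] at h <;>
        simp [h, List.getD_eq_getElem?_getD]
    rw [List.range_succ, List.foldl_append, hsplit]
    simp only [List.foldl_cons, List.foldl_nil]
    by_cases h1 : array.getD n 0 = 1
    · have hlt : n < array.length := hn
      have hn8 : n < 8 := by
        by_contra h8
        rw [not_lt] at h8
        have hmem : array.getD n 0 ∈ array.drop 8 := by
          rw [List.getD_eq_getElem _ _ hlt]
          have h2 : n - 8 < (array.drop 8).length := by simp; omega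
          have : (array.drop 8)[n - 8] = array[n] := by
            rw [List.getElem_drop]; congr 1; omega
          rw [← this]; exact List.getElem_mem h2
        exact hpre _ hmem h1
      rw [if_pos h1, stepA_eq_minterm array _ n h1 hn8, join_snoc]
      refine ⟨?_, ?_⟩
      · rcases eq_or_ne (listB array n) [] with hres | hres
        · have hre : (List.range n).foldl (stepA array) "" = "" := ihIff.mp hres
          rw [if_pos hres, hre]
          simp
        · have hre : (List.range n).foldl (stepA array) "" ≠ "" := fun h => hres (ihIff.mpr h)
          rw [if_neg hres, ihEq, ← ihEq]
          simp [hre]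
      · constructor
        · intro h; exact absurd h (by simp)
        · intro h
          exact absurd h (by
            rw [← stepA_eq_minterm array _ n h1 hn8]
            exact stepA_last_ne array _ n h1 hn8)
    · have hstep : ∀ r, stepA array r n = r := fun r => by unfold stepA; rw [if_neg h1]
      rw [if_neg h1, hstep]
      simpa using ⟨ihEq, ihIff⟩

-- ===== VERDICT =====
theorem func_sdnf_spec : Claim_equal_func_sdnf := by
  intro array _ hpre
  unfold Spec_func_sdnf func_sdnf
  rw [alt_eq_listB]
  exact (main_inv array hpre array.length (le_refl _)).1
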